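-- pv_equiv track=rewrite | github.com/ucscGenomeBrowser/kent | src/hg/makeDb/scripts/encode4regulation/generate_multiwig_ra.py | format_stanza
-- ===== SOURCE A (Python) =====
-- def format_stanza(track_name, settings, indent="    "):
--     """Format a track stanza as .ra text."""
--     lines = [f"{indent}track {track_name}"]
--     # Order: type, longLabel, shortLabel, then rest alphabetically, with specific ones last
--     priority_keys = ['type', 'longLabel', 'shortLabel']
--     last_keys = ['parent', 'bigDataUrl', 'visibility', 'priority', 'color', 'negateValues']
--
--     # Print priority keys first
--     for k in priority_keys:
--         if k in settings:
--             lines.append(f"{indent}{k} {settings[k]}")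
--
--     # Print middle keys alphabetically
--     skip = set(priority_keys + last_keys + ['track'])
--     for k in sorted(settings.keys()):
--         if k not in skip:
--             lines.append(f"{indent}{k} {settings[k]}")
--
--     # Print last keys
--     for k in last_keys:
--         if k in settings:
--             lines.append(f"{indent}{k} {settings[k]}")
--
--     return '\n'.join(lines)
-- ===== SOURCE B (Python) =====
-- _PRIORITY = ['type', 'longLabel', 'shortLabel']
-- _LAST = ['parent', 'bigDataUrl', 'visibility', 'priority', 'color', 'negateValues']
--
--
-- def _rank(k):
--     # Sort key as a single string: '0'+index for priority keys, '1'+key for the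
--     # alphabetical middle block, '2'+index for the trailing keys.
--     if k in _PRIORITY:
--         return '0' + str(_PRIORITY.index(k))
--     if k in _LAST:
--         return '2' + str(_LAST.index(k))
--     return '1' + k
--
--
-- def format_stanza(track_name, settings, indent="    "):
--     """Format a track stanza as .ra text."""
--     body = sorted((k for k in settings if k != 'track'), key=_rank)
--     lines = [f"{indent}track {track_name}"]
--     lines += [f"{indent}{k} {settings[k]}" for k in body]
--     return '\n'.join(lines)
-- ===== Notes on version B (the rewrite author's own statement) =====
-- stated objective: alternative
-- what changed: Replaces A's three positional emission loops (priority list scan, sorted-middle scan with a skip set, last list scan) by one rank function assigning every key a single sort key and one sorted traversal emitting all body lines in a single pass.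
import Mathlib
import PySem

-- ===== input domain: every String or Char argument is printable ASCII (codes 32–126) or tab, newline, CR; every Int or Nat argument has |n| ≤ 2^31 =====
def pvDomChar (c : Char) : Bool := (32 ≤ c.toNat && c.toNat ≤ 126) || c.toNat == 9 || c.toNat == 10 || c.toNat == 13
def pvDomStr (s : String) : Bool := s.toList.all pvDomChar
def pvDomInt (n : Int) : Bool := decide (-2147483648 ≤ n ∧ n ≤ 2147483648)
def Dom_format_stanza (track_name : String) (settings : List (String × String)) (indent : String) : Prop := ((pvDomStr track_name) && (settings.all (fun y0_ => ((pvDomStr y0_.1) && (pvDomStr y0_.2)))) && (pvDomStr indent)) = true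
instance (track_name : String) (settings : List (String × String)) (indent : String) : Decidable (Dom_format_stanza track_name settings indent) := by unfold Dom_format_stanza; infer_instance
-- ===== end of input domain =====

-- B replaces A's three positional emission loops by one rank key and a single sorted pass (objective: alternative decomposition).

-- ===== PORT A =====
-- The dict argument arrives as an association list; PySem.Dict.ofList builds the Python dict it denotes.
-- settings[k] is only reached under a membership guard, so it is ported as getD with an unused default.
def format_stanza (track_name : String) (settings : List (String × String)) (indent : String) : String :=
  let d : PySem.Dict String String := PySem.Dict.ofList settings
  let lines : List String := [indent ++ "track " ++ track_name]
  let priority_keys : List String := ["type", "longLabel", "shortLabel"]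
  let last_keys : List String := ["parent", "bigDataUrl", "visibility", "priority", "color", "negateValues"]
  let lines := priority_keys.foldl (fun ls k =>
    if d.contains k then ls ++ [indent ++ k ++ " " ++ d.getD k ""] else ls) lines
  let skip : PySem.Set String := PySem.Set.ofList (priority_keys ++ last_keys ++ ["track"])
  let lines := (PySem.List.sorted d.keys (fun k => k.toList)).foldl (fun ls k =>
    if !(skip.contains k) then ls ++ [indent ++ k ++ " " ++ d.getD k ""] else ls) lines
  let lines := last_keys.foldl (fun ls k =>
    if d.contains k then ls ++ [indent ++ k ++ " " ++ d.getD k ""] else ls) lines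
  PySem.Str.join "\n" lines

-- ===== PORT B =====
def pvPriority : List String := ["type", "longLabel", "shortLabel"]
def pvLast : List String := ["parent", "bigDataUrl", "visibility", "priority", "color", "negateValues"]

-- _rank from Source B; the 'k in L'/'L.index(k)' pair is ported as one match on index? (some ↔ membership).
def pvRank (k : String) : String :=
  match PySem.List.index? pvPriority k with
  | some i => "0" ++ PySem.Int.toStr i
  | none =>
    match PySem.List.index? pvLast k with
    | some i => "2" ++ PySem.Int.toStr i
    | none => "1" ++ k

def format_stanza_alt (track_name : String) (settings : List (String × String)) (indent : String) : String :=
  let d : PySem.Dict String String := PySem.Dict.ofList settings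
  let body := PySem.List.sorted (d.keys.filter (fun k => !(k == "track"))) (fun k => (pvRank k).toList)
  let lines : List String := [indent ++ "track " ++ track_name]
  let lines := lines ++ body.map (fun k => indent ++ k ++ " " ++ d.getD k "")
  PySem.Str.join "\n" lines

-- ===== PRECONDITION & SPEC =====
def Spec_format_stanza (track_name : String) (settings : List (String × String)) (indent : String) (out : String) : Prop := out = format_stanza_alt track_name settings indent
instance (track_name : String) (settings : List (String × String)) (indent : String) (out : String) : Decidable (Spec_format_stanza track_name settings indent out) := by unfold Spec_format_stanza; infer_instance

-- ===== CLAIM (what is proved, stated in full; the proofs are below) =====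
def Claim_equal_format_stanza : Prop := ∀ (track_name : String) (settings : List (String × String)) (indent : String), Dom_format_stanza track_name settings indent → Spec_format_stanza track_name settings indent (format_stanza track_name settings indent)

-- ===== LEMMAS AND PROOFS =====

-- the two List-Char order instances (core's List.instLT used by the ports, Mathlib's LinearOrder) decide the same order
theorem pv_sorted_inst (xs : List String) (key : String → List Char) (rev : Bool) :
    @PySem.List.sorted String (List Char) List.instLT (fun a b => a.decidableLT b) xs key rev
      = @PySem.List.sorted String (List Char) List.instLinearOrder.toLT LinearOrder.toDecidableLT xs key rev := by
  unfold PySem.List.sorted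
  have hb : (fun (a b : String) => @decide _ ((key a).decidableLT (key b)))
      = (fun a b => @decide _ (@LinearOrder.toDecidableLT _ List.instLinearOrder (key a) (key b))) := by
    funext a b; congr 1
  have hb2 : (fun (a b : String) => @decide _ ((key b).decidableLT (key a)))
      = (fun a b => @decide _ (@LinearOrder.toDecidableLT _ List.instLinearOrder (key b) (key a))) := by
    funext a b; congr 1
  simp only [hb, hb2]

-- rank of a key outside both fixed lists
theorem pv_rank_mid (k : String) (hp : k ∉ pvPriority) (hl : k ∉ pvLast) :
    (pvRank k).toList = '1' :: k.toList := by
  unfold pvRank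
  rw [(PySem.List.index?_eq_none_iff _ _).mpr hp, (PySem.List.index?_eq_none_iff _ _).mpr hl]
  simp

-- B's single sorted pass produces exactly A's three blocks, for any duplicate-free key list
theorem pv_key_order (keys : List String) (hnd : keys.Nodup) :
    @PySem.List.sorted String (List Char) List.instLinearOrder.toLT LinearOrder.toDecidableLT
        (keys.filter (fun k => !(k == "track"))) (fun k => (pvRank k).toList) false
      = pvPriority.filter (fun k => keys.contains k)
        ++ (@PySem.List.sorted String (List Char) List.instLinearOrder.toLT LinearOrder.toDecidableLT
              keys (fun k => k.toList) false).filter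
              (fun k => !((PySem.Set.ofList (pvPriority ++ pvLast ++ ["track"])).contains k))
        ++ pvLast.filter (fun k => keys.contains k) := by
  set P := pvPriority.filter (fun k => keys.contains k) with hP
  set M := (@PySem.List.sorted String (List Char) List.instLinearOrder.toLT LinearOrder.toDecidableLT
      keys (fun k => k.toList) false).filter
      (fun k => !((PySem.Set.ofList (pvPriority ++ pvLast ++ ["track"])).contains k)) with hM
  set L := pvLast.filter (fun k => keys.contains k) with hL
  have hmemP : ∀ x, x ∈ P ↔ x ∈ pvPriority ∧ x ∈ keys := by
    intro x; simp [hP, List.mem_filter]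
  have hmemL : ∀ x, x ∈ L ↔ x ∈ pvLast ∧ x ∈ keys := by
    intro x; simp [hL, List.mem_filter]
  have hmemM : ∀ x, x ∈ M ↔ x ∈ keys ∧ x ∉ pvPriority ∧ x ∉ pvLast ∧ x ≠ "track" := by
    intro x
    simp only [hM, List.mem_filter, PySem.List.mem_sorted, Bool.not_eq_eq_eq_not, Bool.not_true,
      ← Bool.not_eq_true, PySem.Set.contains_iff, PySem.Set.mem_ofList, List.mem_append,
      List.mem_singleton]
    tauto
  have hMnd : M.Nodup :=
    ((@PySem.List.sorted_perm String (List Char) List.instLinearOrder.toLT LinearOrder.toDecidableLT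
      keys (fun k => k.toList) false).symm.nodup hnd).filter _
  apply PySem.List.sorted_eq_of_perm_of_pairwise_lt
  · -- the three blocks are a permutation of the non-'track' keys
    rw [List.append_assoc, List.perm_ext_iff_of_nodup ?_ (hnd.filter _)]
    · intro x
      simp only [List.mem_append, hmemP x, hmemM x, hmemL x, List.mem_filter,
        Bool.not_eq_eq_eq_not, Bool.not_true, beq_eq_false_iff_ne, ne_eq]
      constructor
      · rintro (⟨hp, hx⟩ | ⟨hx, _, _, ht⟩ | ⟨hl, hx⟩)
        · exact ⟨hx, by rintro rfl; simp [pvPriority] at hp⟩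
        · exact ⟨hx, ht⟩
        · exact ⟨hx, by rintro rfl; simp [pvLast] at hl⟩
      · rintro ⟨hx, ht⟩
        by_cases hp : x ∈ pvPriority
        · exact Or.inl ⟨hp, hx⟩
        by_cases hl : x ∈ pvLast
        · exact Or.inr (Or.inr ⟨hl, hx⟩)
        · exact Or.inr (Or.inl ⟨hx, hp, hl, ht⟩)
    · rw [List.nodup_append, List.nodup_append]
      refine ⟨(by decide : pvPriority.Nodup).filter _, ⟨hMnd, (by decide : pvLast.Nodup).filter _, ?_⟩, ?_⟩
      · intro a ha b hb
        rcases (hmemM a).mp ha with ⟨_, _, hal, _⟩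
        rintro rfl; exact hal ((hmemL a).mp hb).1
      · intro a ha b hb
        rcases (hmemP a).mp ha with ⟨hap, _⟩
        rcases (List.mem_append).mp hb with hb | hb
        · rcases (hmemM b).mp hb with ⟨_, hbp, _, _⟩
          rintro rfl; exact hbp hap
        · rcases (hmemL b).mp hb with ⟨hbl, _⟩
          rintro rfl
          revert hap hbl; simp [pvPriority, pvLast]
          rintro (rfl|rfl|rfl) <;> decide
  · -- ranks strictly increase along P ++ M ++ L
    rw [List.append_assoc, List.pairwise_append, List.pairwise_append]
    have hrankM : ∀ x ∈ M, (pvRank x).toList = '1' :: x.toList := by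
      intro x hx
      rcases (hmemM x).mp hx with ⟨_, h1, h2, _⟩
      exact pv_rank_mid x h1 h2
    refine ⟨?_, ⟨?_, ?_, ?_⟩, ?_⟩
    · exact List.Pairwise.filter _
        (by decide : pvPriority.Pairwise (fun a b => (pvRank a).toList < (pvRank b).toList))
    · -- within the middle block: alphabetical and duplicate-free, hence strict
      have hle : M.Pairwise (fun a b => a.toList ≤ b.toList) :=
        (PySem.List.sorted_pairwise keys (fun k => k.toList)).filter _
      refine (hle.and hMnd).imp_of_mem ?_
      rintro a b ha hb ⟨h1, h2⟩
      rw [hrankM a ha, hrankM b hb]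
      exact List.cons_lt_cons_iff.mpr
        (Or.inr ⟨rfl, lt_of_le_of_ne h1 (fun hc => h2 (String.toList_inj.mp hc))⟩)
    · exact List.Pairwise.filter _
        (by decide : pvLast.Pairwise (fun a b => (pvRank a).toList < (pvRank b).toList))
    · -- middle block before last block
      intro a ha b hb
      rw [hrankM a ha]
      have hbl : b ∈ pvLast := ((hmemL b).mp hb).1
      fin_cases hbl
      · rw [show (pvRank "parent").toList = ['2','0'] from by decide]
        simp only [List.cons_lt_cons_iff]; exact Or.inl (by decide)
      · rw [show (pvRank "bigDataUrl").toList = ['2','1'] from by decide]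
        simp only [List.cons_lt_cons_iff]; exact Or.inl (by decide)
      · rw [show (pvRank "visibility").toList = ['2','2'] from by decide]
        simp only [List.cons_lt_cons_iff]; exact Or.inl (by decide)
      · rw [show (pvRank "priority").toList = ['2','3'] from by decide]
        simp only [List.cons_lt_cons_iff]; exact Or.inl (by decide)
      · rw [show (pvRank "color").toList = ['2','4'] from by decide]
        simp only [List.cons_lt_cons_iff]; exact Or.inl (by decide)
      · rw [show (pvRank "negateValues").toList = ['2','5'] from by decide]
        simp only [List.cons_lt_cons_iff]; exact Or.inl (by decide)
    · -- priority block before everything else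
      intro a ha b hb
      have hap : a ∈ pvPriority := ((hmemP a).mp ha).1
      rcases (List.mem_append).mp hb with hbM | hbL
      · -- priority before middle: rank '0…' < '1' :: _
        rw [hrankM b hbM]
        fin_cases hap
        · rw [show (pvRank "type").toList = ['0','0'] from by decide]
          simp only [List.cons_lt_cons_iff]; exact Or.inl (by decide)
        · rw [show (pvRank "longLabel").toList = ['0','1'] from by decide]
          simp only [List.cons_lt_cons_iff]; exact Or.inl (by decide)
        · rw [show (pvRank "shortLabel").toList = ['0','2'] from by decide]
          simp only [List.cons_lt_cons_iff]; exact Or.inl (by decide)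
      · -- priority before last: both literal
        have hbl : b ∈ pvLast := ((hmemL b).mp hbL).1
        exact (by decide : ∀ x ∈ pvPriority, ∀ y ∈ pvLast,
          (pvRank x).toList < (pvRank y).toList) a hap b hbl

-- ===== VERDICT (by name: the statement is the Claim_ definition above) =====
theorem format_stanza_spec : Claim_equal_format_stanza := by
  intro track_name settings indent _
  unfold Spec_format_stanza format_stanza format_stanza_alt
  simp only [PySem.List.foldl_append_if]
  have hc : (PySem.Dict.ofList settings : PySem.Dict String String).contains
      = fun k => (PySem.Dict.ofList settings : PySem.Dict String String).keys.contains k := by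
    funext k
    rw [Bool.eq_iff_iff, PySem.Dict.contains_iff_mem_keys, List.contains_iff_mem]
  rw [hc, pv_sorted_inst, pv_sorted_inst, pv_key_order _ (PySem.Dict.nodup_keys_ofList settings)]
  simp [pvPriority, pvLast, List.map_append, List.append_assoc]
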